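-- pv_equiv track=rewrite | github.com/benquick123/code-profiling | code/batch-2/vse-naloge-brez-testov/DN7-M-139.py | varen_premik
-- ===== SOURCE A (Python) =====
-- def varen_premik(x0, y0, x1, y1, mine):
--     """
--     Vrni `True`, če je pomik z (x0, y0) and (x1, y1) varen, `False`, če ni.
--
--     Args:
--         x0 (int): koordinata x začetnega polja
--         y0 (int): koordinata y začetnega polja
--         x1 (int): koordinata x končnega polja
--         y1 (int): koordinata y končnega polja
--         mine (set of tuple of int): koordinate min
--
--     Returns:
--         bool: `True`, če je premik varen, `False`, če ni.
--     """
--     if (x0, y0) in mine or (x1, y1) in mine: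
--         return False
--
--     if x0 == x1:
--         if y1 < y0:
--             y0, y1 = y1, y0
--         razlika = y1 - y0
--
--         while razlika > 0:
--             y0 += 1
--             if (x0, y0) in mine:
--                 return False
--             else:
--                 razlika -= 1
--                 continue
--
--     else:
--         if x1 < x0:
--             x0, x1 = x1, x0
--
--         razlika = x1 - x0
--
--         while razlika > 0:
--             x0 += 1
--             if (x0, y0) in mine:
--                 return False
--             else:
--                 razlika -= 1
--                 continue
--
--     return True
-- ===== SOURCE B (Python) =====
-- def varen_premik(x0, y0, x1, y1, mine):
--     if (x0, y0) in mine or (x1, y1) in mine: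
--         return False
--     if x0 == x1:
--         lo, hi = min(y0, y1), max(y0, y1)
--         return not any(mx == x0 and lo < my <= hi for (mx, my) in mine)
--     lo, hi = min(x0, x1), max(x0, x1)
--     return not any(my == y0 and lo < mx <= hi for (mx, my) in mine)
-- ===== Notes on version B (the rewrite author's own statement) =====
-- stated objective: faster
-- what changed: B replaces A's cell-by-cell walk along the move (one membership test per traversed cell) with a single scan over the mine set testing each mine against the segment's inclusive coordinate bounds, so cost depends on |mine| instead of |mine| times the move length.
import Mathlib
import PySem

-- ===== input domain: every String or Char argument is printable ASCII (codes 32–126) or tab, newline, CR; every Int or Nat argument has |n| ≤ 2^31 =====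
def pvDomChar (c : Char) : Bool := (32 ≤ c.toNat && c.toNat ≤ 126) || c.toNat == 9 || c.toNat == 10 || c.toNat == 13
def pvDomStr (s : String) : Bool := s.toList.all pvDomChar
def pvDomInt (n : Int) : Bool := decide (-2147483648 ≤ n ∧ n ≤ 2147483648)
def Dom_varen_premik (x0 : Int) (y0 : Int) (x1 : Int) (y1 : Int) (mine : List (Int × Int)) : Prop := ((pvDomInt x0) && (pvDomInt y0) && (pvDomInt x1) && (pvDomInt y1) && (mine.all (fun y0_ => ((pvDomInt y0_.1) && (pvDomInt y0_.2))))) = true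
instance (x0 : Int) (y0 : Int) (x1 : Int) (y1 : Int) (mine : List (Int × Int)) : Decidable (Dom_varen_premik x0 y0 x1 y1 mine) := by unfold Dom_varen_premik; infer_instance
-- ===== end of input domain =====

-- B scans the mine set once with bound tests instead of walking the path cell by cell (objective: faster; measured faster in a timing run).

-- ===== PORT A =====
-- the vertical while-loop of A: step y0 upward `k` times, checking membership after each step
def pvWalkV (x0 : Int) (y0 : Int) (mine : List (Int × Int)) : Nat → Bool
  | 0 => true
  | k + 1 =>
    let y0' := y0 + 1
    if (x0, y0') ∈ mine then false else pvWalkV x0 y0' mine k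

-- the horizontal while-loop of A: step x0 rightward `k` times, checking membership after each step
def pvWalkH (y0 : Int) (x0 : Int) (mine : List (Int × Int)) : Nat → Bool
  | 0 => true
  | k + 1 =>
    let x0' := x0 + 1
    if (x0', y0) ∈ mine then false else pvWalkH y0 x0' mine k

def varen_premik (x0 : Int) (y0 : Int) (x1 : Int) (y1 : Int) (mine : List (Int × Int)) : Bool :=
  if (x0, y0) ∈ mine ∨ (x1, y1) ∈ mine then false
  else if x0 = x1 then
    if y1 < y0 then pvWalkV x0 y1 mine (y0 - y1).toNat
    else pvWalkV x0 y0 mine (y1 - y0).toNat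
  else
    if x1 < x0 then pvWalkH y0 x1 mine (x0 - x1).toNat
    else pvWalkH y0 x0 mine (x1 - x0).toNat

-- ===== PORT B =====
def varen_premik_alt (x0 : Int) (y0 : Int) (x1 : Int) (y1 : Int) (mine : List (Int × Int)) : Bool :=
  if (x0, y0) ∈ mine ∨ (x1, y1) ∈ mine then false
  else if x0 = x1 then
    ! mine.any (fun m => decide (m.1 = x0) && decide (min y0 y1 < m.2) && decide (m.2 ≤ max y0 y1))
  else
    ! mine.any (fun m => decide (m.2 = y0) && decide (min x0 x1 < m.1) && decide (m.1 ≤ max x0 x1))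

-- ===== PRECONDITION & SPEC =====
def Spec_varen_premik (x0 : Int) (y0 : Int) (x1 : Int) (y1 : Int) (mine : List (Int × Int)) (out : Bool) : Prop := out = varen_premik_alt x0 y0 x1 y1 mine
instance (x0 : Int) (y0 : Int) (x1 : Int) (y1 : Int) (mine : List (Int × Int)) (out : Bool) : Decidable (Spec_varen_premik x0 y0 x1 y1 mine out) := by unfold Spec_varen_premik; infer_instance

-- ===== CLAIM (what is proved, stated in full; the proofs are below) =====
def Claim_equal_varen_premik : Prop := ∀ (x0 : Int) (y0 : Int) (x1 : Int) (y1 : Int) (mine : List (Int × Int)), Dom_varen_premik x0 y0 x1 y1 mine → Spec_varen_premik x0 y0 x1 y1 mine (varen_premik x0 y0 x1 y1 mine)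

-- ===== LEMMAS AND PROOFS =====

-- any over a list depends only on the predicate's values on members
theorem pv_any_congr {α : Type} (l : List α) (p q : α → Bool) (h : ∀ a ∈ l, p a = q a) :
    l.any p = l.any q := by
  induction l with
  | nil => rfl
  | cons a t ih =>
    simp only [List.any_cons, h a (List.mem_cons_self ..),
      ih (fun b hb => h b (List.mem_cons_of_mem _ hb))]

-- the vertical walk from y0 for k steps hits a mine iff some mine sits at column x0 strictly between y0 and y0+k (inclusive above)
theorem pvWalkV_eq (x0 : Int) (mine : List (Int × Int)) :
    ∀ (k : Nat) (y0 : Int),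
      pvWalkV x0 y0 mine k
        = ! mine.any (fun m => decide (m.1 = x0) && decide (y0 < m.2) && decide (m.2 ≤ y0 + k)) := by
  intro k
  induction k with
  | zero =>
    intro y0
    simp only [pvWalkV]
    have h : mine.any (fun m => decide (m.1 = x0) && decide (y0 < m.2) && decide (m.2 ≤ y0 + (0:Nat))) = false := by
      rw [List.any_eq_false]
      intro m _
      simp only [Bool.and_eq_true, decide_eq_true_eq, not_and]
      omega
    rw [h]; rfl
  | succ k ih =>
    intro y0
    simp only [pvWalkV]
    by_cases hm : (x0, y0 + 1) ∈ mine
    · simp only [if_pos hm]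
      have h : mine.any (fun m => decide (m.1 = x0) && decide (y0 < m.2) && decide (m.2 ≤ y0 + (k+1:Nat))) = true := by
        rw [List.any_eq_true]
        exact ⟨(x0, y0 + 1), hm, by simp⟩
      rw [h]; rfl
    · simp only [if_neg hm]
      rw [ih (y0 + 1)]
      congr 1
      apply pv_any_congr
      intro m hmem
      by_cases hx : m.1 = x0
      · have hne : m ≠ (x0, y0 + 1) := fun h => hm (h ▸ hmem)
        have hne2 : m.2 ≠ y0 + 1 := by
          intro h2; exact hne (Prod.ext hx h2)
        simp only [hx, decide_true, Bool.true_and]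
        by_cases h1 : y0 + 1 < m.2
        · have h1' : y0 < m.2 := by omega
          simp only [decide_eq_true h1, decide_eq_true h1']
          congr 1
          exact decide_eq_decide.mpr (by omega)
        · have h1' : ¬ (y0 < m.2) := by omega
          simp [h1, h1']
      · simp [hx]

-- same for the horizontal walk
theorem pvWalkH_eq (y0 : Int) (mine : List (Int × Int)) :
    ∀ (k : Nat) (x0 : Int),
      pvWalkH y0 x0 mine k
        = ! mine.any (fun m => decide (m.2 = y0) && decide (x0 < m.1) && decide (m.1 ≤ x0 + k)) := by
  intro k
  induction k with
  | zero =>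
    intro x0
    simp only [pvWalkH]
    have h : mine.any (fun m => decide (m.2 = y0) && decide (x0 < m.1) && decide (m.1 ≤ x0 + (0:Nat))) = false := by
      rw [List.any_eq_false]
      intro m _
      simp only [Bool.and_eq_true, decide_eq_true_eq, not_and]
      omega
    rw [h]; rfl
  | succ k ih =>
    intro x0
    simp only [pvWalkH]
    by_cases hm : (x0 + 1, y0) ∈ mine
    · simp only [if_pos hm]
      have h : mine.any (fun m => decide (m.2 = y0) && decide (x0 < m.1) && decide (m.1 ≤ x0 + (k+1:Nat))) = true := by
        rw [List.any_eq_true]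
        exact ⟨(x0 + 1, y0), hm, by simp⟩
      rw [h]; rfl
    · simp only [if_neg hm]
      rw [ih (x0 + 1)]
      congr 1
      apply pv_any_congr
      intro m hmem
      by_cases hy : m.2 = y0
      · have hne : m ≠ (x0 + 1, y0) := fun h => hm (h ▸ hmem)
        have hne2 : m.1 ≠ x0 + 1 := by
          intro h2; exact hne (Prod.ext h2 hy)
        simp only [hy, decide_true, Bool.true_and]
        by_cases h1 : x0 + 1 < m.1
        · have h1' : x0 < m.1 := by omega
          simp only [decide_eq_true h1, decide_eq_true h1']
          congr 1
          exact decide_eq_decide.mpr (by omega)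
        · have h1' : ¬ (x0 < m.1) := by omega
          simp [h1, h1']
      · simp [hy]

-- ===== VERDICT (by name: the statement is the Claim_ definition above) =====
theorem varen_premik_spec : Claim_equal_varen_premik := by
  intro x0 y0 x1 y1 mine _
  unfold Spec_varen_premik varen_premik varen_premik_alt
  by_cases hend : (x0, y0) ∈ mine ∨ (x1, y1) ∈ mine
  · simp [hend]
  · simp only [if_neg hend]
    by_cases hx : x0 = x1
    · simp only [if_pos hx]
      by_cases hy : y1 < y0
      · simp only [if_pos hy]
        rw [pvWalkV_eq]
        rw [show min y0 y1 = y1 from min_eq_right hy.le, show max y0 y1 = y0 from max_eq_left hy.le]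
        congr 1
        apply pv_any_congr
        intro m _
        congr 2
        exact propext (by omega)
      · simp only [if_neg hy]
        rw [pvWalkV_eq]
        rw [show min y0 y1 = y0 from min_eq_left (by omega), show max y0 y1 = y1 from max_eq_right (by omega)]
        congr 1
        apply pv_any_congr
        intro m _
        congr 2
        exact propext (by omega)
    · simp only [if_neg hx]
      by_cases hxx : x1 < x0
      · simp only [if_pos hxx]
        rw [pvWalkH_eq]
        rw [show min x0 x1 = x1 from min_eq_right hxx.le, show max x0 x1 = x0 from max_eq_left hxx.le]
        congr 1
        apply pv_any_congr
        intro m _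
        congr 2
        exact propext (by omega)
      · simp only [if_neg hxx]
        rw [pvWalkH_eq]
        rw [show min x0 x1 = x0 from min_eq_left (by omega), show max x0 x1 = x1 from max_eq_right (by omega)]
        congr 1
        apply pv_any_congr
        intro m _
        congr 2
        exact propext (by omega)
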